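-- pv_equiv track=rewrite | github.com/avinashrulz/PythonDump | AmazonCodingTest.py | splitsum
-- ===== SOURCE A (Python) =====
-- def splitsum(l):
--     pos = 0
--     neg = 0
--     for i in l:
--         if i>0:
--             i = i*i
--             pos += i
--         if i<0:
--             i = i*i*i
--             neg += i
--     return([pos, neg])
-- ===== SOURCE B (Python) =====
-- def splitsum(l):
--     # divide and conquer: split the list in halves, combine (pos, neg) pairs
--     def go(xs):
--         if not xs:
--             return (0, 0)
--         if len(xs) == 1:
--             i = xs[0]
--             if i > 0:
--                 return (i * i, 0)
--             if i < 0: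
--                 return (0, i * i * i)
--             return (0, 0)
--         mid = len(xs) // 2
--         p1, n1 = go(xs[:mid])
--         p2, n2 = go(xs[mid:])
--         return (p1 + p2, n1 + n2)
--     p, n = go(l)
--     return [p, n]
-- ===== Notes on version B (the rewrite author's own statement) =====
-- stated objective: alternative
-- what changed: Replaces A's single accumulating scan by a divide-and-conquer recursion that splits the list in halves, computes (pos, neg) pairs for each half and adds them; correct because both sums are associative/commutative reductions.
import Mathlib
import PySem

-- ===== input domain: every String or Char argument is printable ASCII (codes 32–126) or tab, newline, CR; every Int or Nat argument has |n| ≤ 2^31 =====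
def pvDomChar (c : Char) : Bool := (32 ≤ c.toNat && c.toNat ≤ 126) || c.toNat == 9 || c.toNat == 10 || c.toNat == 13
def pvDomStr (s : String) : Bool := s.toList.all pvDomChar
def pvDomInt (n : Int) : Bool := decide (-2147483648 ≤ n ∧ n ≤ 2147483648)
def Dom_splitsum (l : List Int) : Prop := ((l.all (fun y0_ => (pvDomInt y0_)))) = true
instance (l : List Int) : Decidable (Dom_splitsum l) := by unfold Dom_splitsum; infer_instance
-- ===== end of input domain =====

-- B replaces A's single accumulating scan by a divide-and-conquer recursion over list halves; same return value.


-- ===== PORT A =====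
-- loop body: if i>0 then i := i*i; pos += i; afterwards if i<0 then i := i*i*i; neg += i
def splitsumStep (st : Int × Int) (i : Int) : Int × Int :=
  let (pos, neg) := st
  let (i, pos) := if i > 0 then (i * i, pos + i * i) else (i, pos)
  if i < 0 then (pos, neg + i * i * i) else (pos, neg)

def splitsum (l : List Int) : List Int :=
  let st := l.foldl splitsumStep (0, 0)
  [st.1, st.2]

-- ===== PORT B =====
-- go(xs): divide and conquer; xs[:mid] / xs[mid:] ported with PySem.List.slice (mid = len(xs)//2 ≥ 0)
def splitsumGo : List Int → Int × Int
  | [] => (0, 0)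
  | [i] => if i > 0 then (i * i, 0) else if i < 0 then (0, i * i * i) else (0, 0)
  | x :: y :: rest =>
    let xs := x :: y :: rest
    let mid : Nat := xs.length / 2
    let a := splitsumGo (PySem.List.slice xs none (some (mid : Int)))
    let b := splitsumGo (PySem.List.slice xs (some (mid : Int)) none)
    (a.1 + b.1, a.2 + b.2)
termination_by xs => xs.length
decreasing_by
  · rw [PySem.List.slice_to_natCast]; simp; omega
  · rw [PySem.List.slice_from_natCast]; simp; omega

def splitsum_alt (l : List Int) : List Int :=
  let st := splitsumGo l
  [st.1, st.2]

-- ===== PRECONDITION & SPEC =====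
def Spec_splitsum (l : List Int) (out : List Int) : Prop := out = splitsum_alt l
instance (l : List Int) (out : List Int) : Decidable (Spec_splitsum l out) := by unfold Spec_splitsum; infer_instance

-- ===== CLAIM (what is proved, stated in full; the proofs are below) =====
def Claim_equal_splitsum : Prop := ∀ (l : List Int), Dom_splitsum l → Spec_splitsum l (splitsum l)

-- ===== LEMMAS AND PROOFS =====
def sumPos (xs : List Int) : Int := ((xs.filter (fun i => i > 0)).map (fun i => i * i)).sum
def sumNeg (xs : List Int) : Int := ((xs.filter (fun i => i < 0)).map (fun i => i * i * i)).sum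

lemma sumPos_append (a b : List Int) : sumPos (a ++ b) = sumPos a + sumPos b := by
  simp [sumPos, List.filter_append]

lemma sumNeg_append (a b : List Int) : sumNeg (a ++ b) = sumNeg a + sumNeg b := by
  simp [sumNeg, List.filter_append]

lemma splitsumGo_eq (xs : List Int) : splitsumGo xs = (sumPos xs, sumNeg xs) := by
  induction xs using splitsumGo.induct with
  | case1 => simp [splitsumGo, sumPos, sumNeg]
  | case2 i h1 =>
    have h2 : ¬ i < 0 := by omega
    simp [splitsumGo, sumPos, sumNeg, h1, h2]
  | case3 i h1 h2 =>
    simp [splitsumGo, sumPos, sumNeg, h1, h2]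
  | case4 i h1 h2 =>
    simp [splitsumGo, sumPos, sumNeg, h1, h2]
  | case5 x y rest xs mid ih1 ih2 =>
    rw [splitsumGo]
    simp only [xs, mid] at ih1 ih2
    rw [PySem.List.slice_to_natCast] at ih1 ⊢
    rw [PySem.List.slice_from_natCast] at ih2 ⊢
    rw [ih1, ih2]
    have h := List.take_append_drop ((x :: y :: rest).length / 2) (x :: y :: rest)
    conv_rhs => rw [← h]
    rw [sumPos_append, sumNeg_append]

lemma splitsum_fold (l : List Int) (p n : Int) :
    l.foldl splitsumStep (p, n) = (p + sumPos l, n + sumNeg l) := by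
  induction l generalizing p n with
  | nil => simp [sumPos, sumNeg]
  | cons a t ih =>
    simp only [List.foldl_cons, splitsumStep]
    by_cases h1 : a > 0
    · have h2 : ¬ a * a < 0 := by nlinarith
      have h3 : ¬ a < 0 := by omega
      simp [h1, h2, h3, ih, sumPos, sumNeg]
      ring
    · by_cases h2 : a < 0
      · simp [h1, h2, ih, sumPos, sumNeg]
        ring
      · simp [h1, h2, ih, sumPos, sumNeg]

-- ===== VERDICT (by name: the statement is the Claim_ definition above) =====
theorem splitsum_spec : Claim_equal_splitsum := by
  intro l _
  unfold Spec_splitsum splitsum splitsum_alt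
  simp [splitsum_fold, splitsumGo_eq]
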